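-- pv_equiv track=rewrite | github.com/massijay/BooleanSearchEngine | booleanmodel/query.py | _replace_spaces_with_ands
-- ===== SOURCE A (Python) =====
-- def _replace_spaces_with_ands(words: list[str]) -> list[str]:
--     if (len(words) == 0):
--         return []
--     correct: list[str] = []
--     for w in words[:-1]:
--         correct += [w, '&' , '(']
--     correct += [words[-1]]
--     correct += [')'] * (len(words) - 1)
--     return correct
-- ===== SOURCE B (Python) =====
-- def _replace_spaces_with_ands(words: list[str]) -> list[str]:
--     # Build the token list back-to-front: closing parens first, then the last
--     # word, then '(' '&' word triples for the earlier words in reverse order;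
--     # one final reverse yields the right-nested expression.
--     if not words:
--         return []
--     it = reversed(words)
--     rev = [')'] * (len(words) - 1)
--     rev.append(next(it))
--     for w in it:
--         rev += ['(', '&', w]
--     rev.reverse()
--     return rev
-- ===== Notes on version B (the rewrite author's own statement) =====
-- stated objective: alternative
-- what changed: B constructs the token list back-to-front in one reverse pass (closers, last word, then '(','&',word triples) and reverses once, instead of A's forward loop over words[:-1] plus a replicated block of closing parens.
import Mathlib
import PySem

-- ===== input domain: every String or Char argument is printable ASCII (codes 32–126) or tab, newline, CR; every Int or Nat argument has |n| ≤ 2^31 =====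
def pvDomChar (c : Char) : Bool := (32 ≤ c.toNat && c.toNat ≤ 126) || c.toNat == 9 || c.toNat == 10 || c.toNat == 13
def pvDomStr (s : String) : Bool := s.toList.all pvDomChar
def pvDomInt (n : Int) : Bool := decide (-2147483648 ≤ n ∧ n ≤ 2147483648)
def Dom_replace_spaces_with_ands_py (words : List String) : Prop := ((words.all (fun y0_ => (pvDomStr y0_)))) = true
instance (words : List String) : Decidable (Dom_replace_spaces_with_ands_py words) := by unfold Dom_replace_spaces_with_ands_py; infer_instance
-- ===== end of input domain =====

-- B builds the token list back-to-front in one reverse pass and reverses once, instead of A's forward loop plus replicated closing parens (alternative decomposition).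


-- ===== PORT A =====
-- words[:-1] is words.dropLast and words[-1] is getLast (exact: len(words) > 0 in that branch);
-- the for-loop is a foldl over that prefix; [')'] * (len(words)-1) is List.replicate.
def replace_spaces_with_ands_py (words : List String) : List String :=
  match words.getLast? with
  | none => []
  | some last =>
      let correct : List String := []
      let correct := words.dropLast.foldl (fun acc w => acc ++ [w, "&", "("]) correct
      let correct := correct ++ [last]
      correct ++ List.replicate (words.length - 1) ")"

-- ===== PORT B =====
-- reversed(words) is consumed as words.reverse: its head is the last word, the tail the earlier
-- words in reverse order; rev.reverse at the end is List.reverse.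
def replace_spaces_with_ands_py_alt (words : List String) : List String :=
  match words.reverse with
  | [] => []
  | last :: earlier =>
      let rev := List.replicate (words.length - 1) ")"
      let rev := rev ++ [last]
      let rev := earlier.foldl (fun a w => a ++ ["(", "&", w]) rev
      rev.reverse

-- ===== PRECONDITION & SPEC =====
def Spec_replace_spaces_with_ands_py (words : List String) (out : List String) : Prop := out = replace_spaces_with_ands_py_alt words
instance (words : List String) (out : List String) : Decidable (Spec_replace_spaces_with_ands_py words out) := by unfold Spec_replace_spaces_with_ands_py; infer_instance

-- ===== CLAIM (what is proved, stated in full; the proofs are below) =====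
def Claim_equal_replace_spaces_with_ands_py : Prop := ∀ (words : List String), Dom_replace_spaces_with_ands_py words → Spec_replace_spaces_with_ands_py words (replace_spaces_with_ands_py words)

-- ===== LEMMAS AND PROOFS =====
theorem foldlA_acc (xs : List String) (acc : List String) :
    xs.foldl (fun a w => a ++ [w, "&", "("]) acc
      = acc ++ xs.foldl (fun a w => a ++ [w, "&", "("]) [] := by
  induction xs generalizing acc with
  | nil => simp
  | cons x xs ih =>
      simp only [List.foldl_cons]
      rw [ih, show ([]:List String) ++ [x, "&", "("] = [x, "&", "("] from rfl, ih ([x, "&", "("])]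
      simp

theorem foldlB_acc (xs : List String) (acc : List String) :
    xs.foldl (fun a w => a ++ ["(", "&", w]) acc
      = acc ++ xs.foldl (fun a w => a ++ ["(", "&", w]) [] := by
  induction xs generalizing acc with
  | nil => simp
  | cons x xs ih =>
      simp only [List.foldl_cons]
      rw [ih, show ([]:List String) ++ ["(", "&", x] = ["(", "&", x] from rfl, ih (["(", "&", x])]
      simp

theorem rev_fold_eq (xs : List String) :
    (xs.reverse.foldl (fun a w => a ++ ["(", "&", w]) []).reverse
      = xs.foldl (fun a w => a ++ [w, "&", "("]) [] := by
  induction xs with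
  | nil => rfl
  | cons x xs ih =>
      rw [List.reverse_cons, List.foldl_append, foldlB_acc, List.foldl_cons]
      simp only [List.foldl_nil, List.nil_append, List.reverse_append]
      rw [ih, List.foldl_cons, foldlA_acc]
      simp

theorem ports_agree (words : List String) :
    replace_spaces_with_ands_py words = replace_spaces_with_ands_py_alt words := by
  cases hw : words.reverse with
  | nil =>
      have : words = [] := by simpa using congrArg List.reverse hw
      subst this; rfl
  | cons last earlier =>
      have hwords : words = earlier.reverse ++ [last] := by
        have := congrArg List.reverse hw
        simpa using this
      have hlast : words.getLast? = some last := by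
        rw [hwords]; simp
      have hdrop : words.dropLast = earlier.reverse := by
        rw [hwords]; simp
      simp only [replace_spaces_with_ands_py, replace_spaces_with_ands_py_alt, hw, hlast,
        hdrop]
      rw [foldlB_acc]
      simp only [List.reverse_append, List.reverse_replicate, List.reverse_cons,
        List.reverse_nil, List.nil_append]
      rw [← rev_fold_eq earlier.reverse, List.reverse_reverse]
      simp

-- ===== VERDICT (by name: the statement is the Claim_ definition above) =====
theorem replace_spaces_with_ands_py_spec : Claim_equal_replace_spaces_with_ands_py := by
  intro words _
  exact ports_agree words
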